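-- pv_equiv track=rewrite | github.com/pypi-data/pypi-mirror-404 | packages/deepresearch-flow/deepresearch_flow-0.6.1-py3-none-any.whl/deepresearch_flow/recognize/mermaid.py | _expand_escaped_newlines
-- ===== SOURCE A (Python) =====
-- def _expand_escaped_newlines(text: str) -> str:
--     out: list[str] = []
--     depth = 0
--     i = 0
--     while i < len(text):
--         ch = text[i]
--         if ch in "[({":
--             depth += 1
--         elif ch in "])}":
--             depth = max(0, depth - 1)
--         if ch == "\\" and i + 1 < len(text) and text[i + 1] == "n":
--             out.append("<br/>" if depth > 0 else "\n")
--             i += 2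
--             continue
--         out.append(ch)
--         i += 1
--     return "".join(out)
-- ===== SOURCE B (Python) =====
-- def _expand_escaped_newlines(text: str) -> str:
--     # Pass 1: per-character bracket-depth table (depth AFTER consuming each char,
--     # clamped at 0 like the original's max(0, depth - 1)).
--     depths = []
--     acc = 0
--     for c in text:
--         acc = max(0, acc + (1 if c in "[({" else -1 if c in "])}" else 0))
--         depths.append(acc)
--     # Pass 2: index scan replacing "\n" escapes, consuming two chars at a time.
--     out = []
--     i = 0
--     n = len(text)
--     while i < n:
--         if text[i] == "\\" and i + 1 < n and text[i + 1] == "n":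
--             out.append("<br/>" if depths[i] > 0 else "\n")
--             i += 2
--         else:
--             out.append(text[i])
--             i += 1
--     return "".join(out)
-- ===== Notes on version B (the rewrite author's own statement) =====
-- stated objective: alternative
-- what changed: A fuses depth tracking and escape replacement in one stateful while-loop; B first builds a per-character clamped bracket-depth table in a separate pass, then does a stateless index scan that consults the table to choose the break tag or a plain newline.
import Mathlib
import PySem

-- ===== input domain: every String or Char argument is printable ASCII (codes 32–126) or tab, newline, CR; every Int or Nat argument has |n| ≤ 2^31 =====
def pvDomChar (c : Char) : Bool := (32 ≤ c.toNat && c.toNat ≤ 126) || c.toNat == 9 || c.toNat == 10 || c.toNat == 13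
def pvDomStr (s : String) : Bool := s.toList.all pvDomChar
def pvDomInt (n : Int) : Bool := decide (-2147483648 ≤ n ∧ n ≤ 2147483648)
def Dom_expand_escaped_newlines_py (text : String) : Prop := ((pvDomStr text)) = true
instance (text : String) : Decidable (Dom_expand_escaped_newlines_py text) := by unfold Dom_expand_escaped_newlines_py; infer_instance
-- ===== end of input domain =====

-- B replaces A's single fused stateful loop by a two-pass decomposition: a precomputed
-- clamped bracket-depth table, then a stateless index scan over it (objective: alternative).

-- ===== PORT A =====
-- depth update of A's loop body (the two leading if/elif branches)
def pvA_depth (depth : Int) (c : Char) : Int :=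
  if c = '[' ∨ c = '(' ∨ c = '{' then depth + 1
  else if c = ']' ∨ c = ')' ∨ c = '}' then max 0 (depth - 1)
  else depth

-- A's while-loop: one pass, carrying the depth; '\' followed by 'n' consumes two chars
def pvA_go (cs : List Char) (depth : Int) : List Char :=
  match cs with
  | [] => []
  | c :: rest =>
    let d := pvA_depth depth c
    if c = '\\' ∧ rest.head? = some 'n' then
      (if d > 0 then "<br/>".toList else ['\n']) ++ pvA_go rest.tail d
    else
      c :: pvA_go rest d
termination_by cs.length
decreasing_by all_goals (simp [List.length_tail]; try omega)

def expand_escaped_newlines_py (text : String) : String :=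
  String.mk (pvA_go text.toList 0)

-- ===== PORT B =====
-- per-char bracket delta
def pvB_delta (c : Char) : Int :=
  if c = '[' ∨ c = '(' ∨ c = '{' then 1
  else if c = ']' ∨ c = ')' ∨ c = '}' then -1
  else 0

-- pass 1: depth table, depths[i] = clamped depth AFTER consuming char i
def pvB_depths (acc : Int) (cs : List Char) : List Int :=
  match cs with
  | [] => []
  | c :: rest =>
    let a := max 0 (acc + pvB_delta c)
    a :: pvB_depths a rest

-- pass 2: index scan over the original string consulting the table
def pvB_go (cs : List Char) (depths : List Int) (i : Nat) : List Char :=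
  if i < cs.length then
    if cs[i]?.getD ' ' = '\\' ∧ i + 1 < cs.length ∧ cs[i+1]?.getD ' ' = 'n' then
      (if depths[i]?.getD 0 > 0 then "<br/>".toList else ['\n']) ++ pvB_go cs depths (i + 2)
    else
      cs[i]?.getD ' ' :: pvB_go cs depths (i + 1)
  else []
termination_by cs.length - i
decreasing_by all_goals omega

def expand_escaped_newlines_py_alt (text : String) : String :=
  String.mk (pvB_go text.toList (pvB_depths 0 text.toList) 0)

-- ===== PRECONDITION & SPEC =====
def Spec_expand_escaped_newlines_py (text : String) (out : String) : Prop := out = expand_escaped_newlines_py_alt text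
instance (text : String) (out : String) : Decidable (Spec_expand_escaped_newlines_py text out) := by unfold Spec_expand_escaped_newlines_py; infer_instance

-- ===== CLAIM (what is proved, stated in full; the proofs are below) =====
def Claim_equal_expand_escaped_newlines_py : Prop := ∀ (text : String), Dom_expand_escaped_newlines_py text → Spec_expand_escaped_newlines_py text (expand_escaped_newlines_py text)

-- ===== LEMMAS AND PROOFS =====

-- the clamped fold both programs effectively compute
def pvF (a : Int) (c : Char) : Int := max 0 (a + pvB_delta c)

-- depth A carries after i characters
def pvDAt (cs : List Char) (i : Nat) : Int := (cs.take i).foldl pvF 0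

lemma foldl_pvF_nonneg (l : List Char) : ∀ a : Int, 0 ≤ a → 0 ≤ l.foldl pvF a := by
  induction l with
  | nil => intro a h; simpa using h
  | cons c rest ih =>
    intro a _
    exact ih (pvF a c) (by simp [pvF])

lemma pvDAt_nonneg (cs : List Char) (i : Nat) : 0 ≤ pvDAt cs i :=
  foldl_pvF_nonneg _ 0 le_rfl

lemma pvA_depth_eq_pvF (d : Int) (c : Char) (hd : 0 ≤ d) : pvA_depth d c = pvF d c := by
  unfold pvA_depth pvF pvB_delta
  split_ifs <;> omega

lemma pvDepths_getD (cs : List Char) : ∀ (a : Int) (i : Nat), i < cs.length →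
    (pvB_depths a cs)[i]?.getD 0 = (cs.take (i+1)).foldl pvF a := by
  induction cs with
  | nil => intro a i h; simp at h
  | cons c rest ih =>
    intro a i h
    cases i with
    | zero => simp [pvB_depths, pvF]
    | succ i =>
      simp only [pvB_depths, List.getElem?_cons_succ, List.take_succ_cons, List.foldl_cons]
      exact ih _ i (by simpa using h)

lemma pvDAt_succ (cs : List Char) (i : Nat) (h : i < cs.length) :
    pvDAt cs (i+1) = pvF (pvDAt cs i) cs[i] := by
  unfold pvDAt
  rw [List.take_add_one, List.foldl_append]
  simp [List.getElem?_eq_getElem h]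

lemma pv_main (cs : List Char) : ∀ (k i : Nat), cs.length - i ≤ k →
    pvA_go (cs.drop i) (pvDAt cs i) = pvB_go cs (pvB_depths 0 cs) i := by
  intro k
  induction k with
  | zero =>
    intro i h
    have hi : ¬ i < cs.length := by omega
    have hnil : cs.drop i = [] := List.drop_eq_nil_of_le (by omega)
    rw [pvB_go, hnil]
    simp [hi, pvA_go]
  | succ k ih =>
    intro i h
    by_cases hi : i < cs.length
    · have hdrop : cs.drop i = cs[i] :: cs.drop (i+1) := List.drop_eq_getElem_cons hi
      have hgc : cs[i]?.getD ' ' = cs[i] := by simp [List.getElem?_eq_getElem hi]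
      have hhead : (cs.drop (i+1)).head? = cs[i+1]? := List.head?_drop
      have hd : pvA_depth (pvDAt cs i) cs[i] = pvDAt cs (i+1) := by
        rw [pvA_depth_eq_pvF _ _ (pvDAt_nonneg cs i), pvDAt_succ cs i hi]
      rw [pvB_go, if_pos hi, hdrop, pvA_go, hgc]
      simp only [hd]
      by_cases hc : cs[i] = '\\' ∧ i + 1 < cs.length ∧ cs[i+1]?.getD ' ' = 'n'
      · -- escape branch on both sides
        obtain ⟨hc1, hc2, hc3⟩ := hc
        have hget : cs[i+1]? = some 'n' := by
          rw [List.getElem?_eq_getElem hc2] at hc3 ⊢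
          simpa using hc3
        have hA : cs[i] = '\\' ∧ (cs.drop (i+1)).head? = some 'n' := ⟨hc1, by rw [hhead, hget]⟩
        have hB : cs[i] = '\\' ∧ i + 1 < cs.length ∧ cs[i+1]?.getD ' ' = 'n' := ⟨hc1, hc2, hc3⟩
        rw [if_pos hA, if_pos hB]
        have htail : (cs.drop (i+1)).tail = cs.drop (i+2) := by rw [List.tail_drop]
        have hdep : (pvB_depths 0 cs)[i]?.getD 0 = pvDAt cs (i+1) := by
          rw [pvDepths_getD cs 0 i hi]; rfl
        have hn : cs[i+1] = 'n' := by
          have h' := List.getElem?_eq_getElem hc2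
          rw [hget] at h'
          exact (Option.some.injEq _ _).mp h'.symm
        have hskip : pvDAt cs (i+2) = pvDAt cs (i+1) := by
          rw [show i + 2 = (i+1)+1 from rfl, pvDAt_succ cs (i+1) hc2, hn]
          have hz : pvB_delta 'n' = 0 := by decide
          simp only [pvF, hz, add_zero]
          exact max_eq_right (pvDAt_nonneg cs (i+1))
        rw [htail, hdep, ← hskip]
        congr 1
        exact ih (i+2) (by omega)
      · -- plain-char branch on both sides
        have hA : ¬ (cs[i] = '\\' ∧ (cs.drop (i+1)).head? = some 'n') := by
          rw [hhead]
          rintro ⟨h1, h2⟩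
          apply hc
          have hlt : i + 1 < cs.length := (List.getElem?_eq_some_iff.mp h2).1
          exact ⟨h1, hlt, by rw [h2]; rfl⟩
        rw [if_neg hA, if_neg hc]
        congr 1
        exact ih (i+1) (by omega)
    · have hnil : cs.drop i = [] := List.drop_eq_nil_of_le (by omega)
      rw [pvB_go, if_neg hi, hnil]
      simp [pvA_go]

-- ===== VERDICT (by name: the statement is the Claim_ definition above) =====
theorem expand_escaped_newlines_py_spec : Claim_equal_expand_escaped_newlines_py := by
  intro text _
  unfold Spec_expand_escaped_newlines_py expand_escaped_newlines_py expand_escaped_newlines_py_alt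
  have := pv_main text.toList text.toList.length 0 (by omega)
  exact congrArg String.mk (by simpa [pvDAt] using this)
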